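-- pv_equiv track=rewrite | github.com/xplanandum/x-wff | game/logic.py | wff_eval
-- ===== SOURCE A (Python) =====
-- def wff_eval(s, mode):
--     """input: s is string that can encode a wff,
--     mode is int -> {0: exclude o and i, 1: exclude i, 2: exclude o,
--       3: include all variables}
--     output: bool, whether input is a wff or not in x-wff language.
--     """
--     # Phase 1 - exclude obvious non-wffs
--     valid_caps = ['N', 'C', 'A', 'K', 'E']
--     valid_lows = ['p', 'q', 'r', 's', 'o', 'i']
--     # check that s contains at least one propositional variable:
--     if len([x for x in valid_lows if x in s]) == 0:
--         return False
--     # check that s contains all and only valid letters: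
--     if len([x for x in s if x in valid_caps or x in valid_lows]) == 0:
--         return False
--     # check that s is not longer than max possible wff size:
--     if len(s) > 6:
--         return False
--     # check that s is legal in the current gamemode:
--     if mode == 0:
--         if 'o' in s or 'i' in s:
--             return False
--     elif mode == 1:
--         if 'i' in s:
--             return False
--     elif mode == 2:
--         if 'o' in s:
--             return False
--     # check that s is atomic if it is one character:
--     if len(s) == 1 and s not in valid_lows:
--         return False
--
--     # Phase 2 - parse s as a stack of characters, read in left to right
--     binary_caps = [x for x in valid_caps if x != 'N']
--     stack = list(s)
--     wffList = []  # bool values will be appended here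
--     while len(stack) > 0:
--         # atomic wffs (lowercase) count as one wff and can appear
--         # anywhere so long as the total num of wffs is
--         # not greater than 1 by end:
--         if stack[-1] in valid_lows:
--             wffList.append(True)
--             stack.pop()
--             continue
--         # unary connectives (N) can appear after at least 1 wff has
--         # appeared:
--         elif stack[-1] == 'N' and len(wffList) >= 1:
--             stack.pop()
--             continue
--         # binary connectives (C, A, K, E) can appear after at least 2
--         # wffs have appeared:
--         elif stack[-1] in binary_caps and len(wffList) >= 2:
--             wffList.pop()
--             stack.pop()
--             continue
--         else:
--             return False
--     # string is a wff iff it is exactly 1 wff after evaluating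
--     # connectives
--     if len(wffList) == 1:
--         return True
--     else:
--         return False
-- ===== SOURCE B (Python) =====
-- def wff_eval(s, mode):
--     """input/output as the original: True iff s encodes a wff of the x-wff
--     language legal for the given mode. One guard plus a left-to-right
--     recursive-descent prefix parse instead of the right-to-left stack loop."""
--     lows = "pqrsoi"
--     banned = "oi" if mode == 0 else "i" if mode == 1 else "o" if mode == 2 else ""
--     if len(s) > 6 or not any(c in lows for c in s) or any(c in banned for c in s):
--         return False
--
--     def parse(i):
--         """Consume one wff starting at i; return the index just past it, or None."""
--         if i >= len(s):
--             return None
--         c = s[i]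
--         if c in lows:
--             return i + 1
--         if c == 'N':
--             return parse(i + 1)
--         if c in "CAKE":
--             j = parse(i + 1)
--             return parse(j) if j is not None else None
--         return None
--
--     return parse(0) == len(s)
-- ===== Notes on version B (the rewrite author's own statement) =====
-- stated objective: alternative
-- what changed: A's staged guard chain plus a right-to-left stack/counter while-loop is replaced by a single combined guard (the two guards of A that are implied by the others are dropped) and a left-to-right recursive-descent prefix parser that consumes one wff from the front and accepts iff it consumes the whole string.
import Mathlib
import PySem

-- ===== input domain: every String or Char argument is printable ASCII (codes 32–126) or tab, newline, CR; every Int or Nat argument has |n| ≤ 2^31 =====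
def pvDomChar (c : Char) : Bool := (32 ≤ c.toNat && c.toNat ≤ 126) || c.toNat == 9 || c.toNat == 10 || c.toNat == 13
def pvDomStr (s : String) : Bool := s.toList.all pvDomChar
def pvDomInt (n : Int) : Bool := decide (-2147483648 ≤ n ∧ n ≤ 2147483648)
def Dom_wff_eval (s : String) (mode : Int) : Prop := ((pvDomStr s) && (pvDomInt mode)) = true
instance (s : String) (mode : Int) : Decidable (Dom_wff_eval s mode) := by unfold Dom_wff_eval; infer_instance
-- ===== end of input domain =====

-- B replaces A's staged guard chain and right-to-left stack/counter loop by one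
-- combined guard plus a left-to-right recursive-descent prefix parser (objective: alternative).

-- ===== PORT A =====
-- A's Phase-2 while loop: pop from the END of `stack`, maintain `wffList` (a list of trues).
def loopA (stack : List Char) (wffList : List Bool) : Bool :=
  if hne : stack = [] then wffList.length == 1
  else
    let x := stack.getLast hne
    if x ∈ (['p','q','r','s','o','i'] : List Char) then
      loopA stack.dropLast (wffList ++ [true])
    else if x = 'N' ∧ 1 ≤ wffList.length then
      loopA stack.dropLast wffList
    else if x ∈ ((['N','C','A','K','E'] : List Char).filter (fun c => c ≠ 'N')) ∧ 2 ≤ wffList.length then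
      loopA stack.dropLast wffList.dropLast
    else false
termination_by stack.length
decreasing_by
  all_goals
    (have hpos := List.length_pos_of_ne_nil hne
     simp only [List.length_dropLast]
     omega)

def wff_eval (s : String) (mode : Int) : Bool :=
  let valid_caps : List Char := ['N','C','A','K','E']
  let valid_lows : List Char := ['p','q','r','s','o','i']
  if (valid_lows.filter (fun x => s.toList.contains x)).length == 0 then false
  else if (s.toList.filter (fun x => valid_caps.contains x || valid_lows.contains x)).length == 0 then false
  else if 6 < s.toList.length then false
  else if mode == 0 && (s.toList.contains 'o' || s.toList.contains 'i') then false
  else if mode == 1 && s.toList.contains 'i' then false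
  else if mode == 2 && s.toList.contains 'o' then false
  else if s.toList.length == 1 && !((["p","q","r","s","o","i"] : List String).contains s) then false
  else loopA s.toList []

-- ===== PORT B =====
-- B's recursive-descent parser: consume one wff from the front, return the rest
-- (Source B returns the index just past the wff; the subtype bound is only the totality guard).
def parseB : (l : List Char) → Option {r : List Char // r.length < l.length}
  | [] => none
  | c :: rest =>
    if c ∈ (['p','q','r','s','o','i'] : List Char) then
      some ⟨rest, by simp⟩
    else if c = 'N' then
      match parseB rest with
      | some ⟨r, hr⟩ => some ⟨r, by simp only [List.length_cons]; omega⟩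
      | none => none
    else if c ∈ (['C','A','K','E'] : List Char) then
      match parseB rest with
      | some ⟨r1, h1⟩ =>
        match parseB r1 with
        | some ⟨r2, h2⟩ => some ⟨r2, by simp only [List.length_cons]; omega⟩
        | none => none
      | none => none
    else none
termination_by l => l.length
decreasing_by all_goals (simp only [List.length_cons]; omega)

-- Source B's `parse(0) == len(s)`: one top-level parse must consume the whole string
def parseAccept (l : List Char) : Bool :=
  match parseB l with
  | some ⟨[], _⟩ => true
  | _ => false

def wff_eval_alt (s : String) (mode : Int) : Bool :=
  let lows : List Char := "pqrsoi".toList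
  let banned : List Char :=
    (if mode == 0 then "oi" else if mode == 1 then "i" else if mode == 2 then "o" else "").toList
  if 6 < s.toList.length || !(s.toList.any (fun c => lows.contains c))
      || s.toList.any (fun c => banned.contains c) then false
  else parseAccept s.toList

-- ===== PRECONDITION & SPEC =====
def Spec_wff_eval (s : String) (mode : Int) (out : Bool) : Prop := out = wff_eval_alt s mode
instance (s : String) (mode : Int) (out : Bool) : Decidable (Spec_wff_eval s mode out) := by unfold Spec_wff_eval; infer_instance

-- ===== CLAIM (what is proved, stated in full; the proofs are below) =====
def Claim_equal_wff_eval : Prop := ∀ (s : String) (mode : Int), Dom_wff_eval s mode → Spec_wff_eval s mode (wff_eval s mode)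

-- ===== LEMMAS AND PROOFS =====

-- counter semantics of one step of A's loop (only the LENGTH of wffList matters)
def stepC (x : Char) (c : Nat) : Option Nat :=
  if x ∈ (['p','q','r','s','o','i'] : List Char) then some (c + 1)
  else if x = 'N' then (if 1 ≤ c then some c else none)
  else if x ∈ (['C','A','K','E'] : List Char) then (if 2 ≤ c then some (c - 1) else none)
  else none

def cRun : List Char → Nat → Option Nat
  | [], c => some c
  | x :: xs, c => match stepC x c with
    | some c' => cRun xs c'
    | none => none

-- plain-valued wrapper around parseB
def parseB' (l : List Char) : Option (List Char) := (parseB l).map (·.1)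

theorem parseB'_nil : parseB' [] = none := by simp [parseB', parseB]

theorem parseB'_cons (c : Char) (rest : List Char) :
    parseB' (c :: rest) =
      (if c ∈ (['p','q','r','s','o','i'] : List Char) then some rest
       else if c = 'N' then parseB' rest
       else if c ∈ (['C','A','K','E'] : List Char) then (parseB' rest).bind parseB' else none) := by
  simp only [parseB']
  rw [parseB]
  split_ifs with h1 h2 h3
  · rfl
  · cases hp : parseB rest with
    | none => simp
    | some v => obtain ⟨r, hr⟩ := v; simp
  · cases hp : parseB rest with
    | none => simp
    | some v =>
      obtain ⟨r1, hr1⟩ := v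
      cases hq : parseB r1 with
      | none => simp [hq]
      | some w => obtain ⟨r2, hr2⟩ := w; simp [hq]
  · rfl

theorem parseB'_length {l r : List Char} (h : parseB' l = some r) : r.length < l.length := by
  unfold parseB' at h
  cases hp : parseB l with
  | none => rw [hp] at h; simp at h
  | some v =>
    obtain ⟨r', hr⟩ := v
    rw [hp] at h
    simp at h
    exact h ▸ hr

theorem cRun_append (a b : List Char) (c : Nat) :
    cRun (a ++ b) c = (cRun a c).bind (fun c' => cRun b c') := by
  induction a generalizing c with
  | nil => simp [cRun]
  | cons x xs ih =>
    simp only [List.cons_append, cRun]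
    cases stepC x c with
    | none => rfl
    | some c' => exact ih c'

-- A's loop equals the counter run over the REVERSED stack
theorem loopA_eq (st : List Char) : ∀ w : List Bool,
    loopA st w = (cRun st.reverse w.length == some 1) := by
  induction st using List.reverseRecOn with
  | nil => intro w; rw [loopA]; simp [cRun]
  | append_singleton ys x ih =>
    intro w
    rw [loopA]
    simp only [List.getLast_concat, List.dropLast_concat, List.reverse_append,
      List.reverse_cons, List.reverse_nil, List.nil_append, List.singleton_append, cRun,
      List.append_eq_nil_iff, List.cons_ne_nil, and_false, dite_false]
    by_cases hx1 : x ∈ (['p','q','r','s','o','i'] : List Char)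
    · simp [hx1, stepC, ih, List.length_append]
    · by_cases hx2 : x = 'N'
      · by_cases hw : 1 ≤ w.length
        · simp [hx2, hw, stepC, ih]
        · simp [hx2, hw, stepC]
      · by_cases hx3 : x ∈ (['C','A','K','E'] : List Char)
        · by_cases hw : 2 ≤ w.length
          · simp [hx1, hx2, hx3, hw, stepC, ih, List.length_dropLast]
          · simp [hx1, hx2, hx3, hw, stepC]
        · simp [hx1, hx2, hx3, stepC]

-- soundness: a parsed prefix contributes exactly one wff to the counter
theorem parse_sound : ∀ n l r, List.length l ≤ n → parseB' l = some r →
    ∀ c, cRun l.reverse c = (cRun r.reverse c).map (· + 1) := by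
  intro n
  induction n with
  | zero =>
    intro l r hl hp
    cases l with
    | nil => rw [parseB'_nil] at hp; exact absurd hp (by simp)
    | cons x xs => simp at hl
  | succ n ih =>
    intro l r hl hp c
    cases l with
    | nil => rw [parseB'_nil] at hp; exact absurd hp (by simp)
    | cons x rest =>
      rw [parseB'_cons] at hp
      split_ifs at hp with h1 h2 h3
      · obtain rfl : r = rest := by injection hp with h; exact h.symm
        rw [List.reverse_cons, cRun_append]
        have hstep : ∀ c', cRun [x] c' = some (c' + 1) := by
          intro c'; simp [cRun, stepC, h1]
        cases cRun r.reverse c <;> simp [hstep]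
      · have ihr := ih rest r (by simp at hl; omega) hp c
        rw [List.reverse_cons, cRun_append, ihr]
        cases cRun r.reverse c with
        | none => simp
        | some d => simp [cRun, stepC, h2]
      · cases hb : parseB' rest with
        | none => rw [hb] at hp; exact absurd hp (by simp)
        | some r1 =>
          rw [hb] at hp
          simp only [Option.bind_some] at hp
          have hlen := parseB'_length hb
          have h1r := ih rest r1 (by simp at hl; omega) hb c
          have h2r := ih r1 r (by simp at hl; omega) hp c
          rw [List.reverse_cons, cRun_append, h1r, h2r]
          cases cRun r.reverse c with
          | none => simp
          | some d =>
            simp [cRun, stepC, h1, h2, h3]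

-- completeness: a successful counter run factors through the parser
theorem parse_complete : ∀ n l d, List.length l ≤ n → cRun l.reverse 0 = some d →
    (d = 0 ∧ l = []) ∨ (1 ≤ d ∧ ∃ r, parseB' l = some r ∧ cRun r.reverse 0 = some (d - 1)) := by
  intro n
  induction n with
  | zero =>
    intro l d hl hc
    cases l with
    | nil => left; simp only [List.reverse_nil, cRun] at hc; exact ⟨by injection hc; omega, rfl⟩
    | cons x xs => simp at hl
  | succ n ih =>
    intro l d hl hc
    cases l with
    | nil => left; simp only [List.reverse_nil, cRun] at hc; exact ⟨by injection hc; omega, rfl⟩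
    | cons x rest =>
      rw [List.reverse_cons, cRun_append] at hc
      cases hcr : cRun rest.reverse 0 with
      | none => rw [hcr] at hc; exact absurd hc (by simp)
      | some e =>
        rw [hcr] at hc
        simp only [Option.bind_some, cRun] at hc
        cases hs : stepC x e with
        | none => rw [hs] at hc; exact absurd hc (by simp)
        | some d' =>
          rw [hs] at hc
          have hdd : d' = d := Option.some.inj hc
          unfold stepC at hs
          split_ifs at hs with h1 h2 h3 h4 h5
          · -- atomic char
            have he : e + 1 = d' := Option.some.inj hs
            right
            refine ⟨by omega, rest, ?_, ?_⟩
            · rw [parseB'_cons]; simp [h1]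
            · rw [show d - 1 = e from by omega]; exact hcr
          · -- 'N' with 1 ≤ e
            have he : e = d' := Option.some.inj hs
            rcases ih rest e (by simp at hl; omega) hcr with ⟨he0, _⟩ | ⟨_, r, hpr, hcr'⟩
            · omega
            · right
              refine ⟨by omega, r, ?_, ?_⟩
              · rw [parseB'_cons]; simp [h2, hpr]
              · rw [show d - 1 = e - 1 from by omega]; exact hcr'
          · -- binary cap with 2 ≤ e
            have he : e - 1 = d' := Option.some.inj hs
            rcases ih rest e (by simp at hl; omega) hcr with ⟨he0, _⟩ | ⟨_, r1, hpr1, hcr1⟩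
            · omega
            · have hlen := parseB'_length hpr1
              rcases ih r1 (e - 1) (by simp at hl; omega) hcr1 with ⟨he1, _⟩ | ⟨_, r, hpr, hcr'⟩
              · omega
              · right
                refine ⟨by omega, r, ?_, ?_⟩
                · rw [parseB'_cons]; simp [h1, h2, h4, hpr1, hpr]
                · rw [show d - 1 = e - 1 - 1 from by omega]; exact hcr'

theorem phase2_eq (l : List Char) :
    (cRun l.reverse 0 == some 1) = parseAccept l := by
  have haccept : parseAccept l = (parseB' l == some []) := by
    unfold parseAccept parseB'
    cases hp : parseB l with
    | none => simp
    | some v =>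
      obtain ⟨r, hr⟩ := v
      cases r with
      | nil => simp
      | cons a t => simp
  rw [haccept]
  by_cases hL : cRun l.reverse 0 = some 1
  · rcases parse_complete l.length l 1 le_rfl hL with ⟨h10, _⟩ | ⟨_, r, hpr, hcr⟩
    · omega
    · simp only [Nat.sub_self] at hcr
      rcases parse_complete r.length r 0 le_rfl hcr with ⟨_, rfl⟩ | ⟨h10, _⟩
      · simp [hL, hpr]
      · omega
  · have hR : parseB' l ≠ some [] := by
      intro hR
      have := parse_sound l.length l [] le_rfl hR 0
      simp [cRun] at this
      exact hL this
    simp [hL, hR]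

-- ===== Phase-1 bridge lemmas =====

-- A's first guard is the negation of B's "some propositional variable occurs"
theorem guard1_eq (l : List Char) :
    (((['p','q','r','s','o','i'] : List Char).filter (fun x => l.contains x)).length == 0)
      = !(l.any (fun c => ("pqrsoi".toList).contains c)) := by
  rw [Bool.eq_iff_iff]
  simp [List.length_eq_zero_iff, List.filter_eq_nil_iff]
  constructor
  · rintro ⟨hp, hq, hr, hs, ho, hi⟩ x hx
    exact ⟨fun e => hp (e ▸ hx), fun e => hq (e ▸ hx), fun e => hr (e ▸ hx),
           fun e => hs (e ▸ hx), fun e => ho (e ▸ hx), fun e => hi (e ▸ hx)⟩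
  · intro a
    exact ⟨fun h => (a _ h).1 rfl, fun h => (a _ h).2.1 rfl, fun h => (a _ h).2.2.1 rfl,
           fun h => (a _ h).2.2.2.1 rfl, fun h => (a _ h).2.2.2.2.1 rfl,
           fun h => (a _ h).2.2.2.2.2 rfl⟩

-- A's second guard is dead once a propositional variable occurs
theorem guard2_dead (l : List Char)
    (h : l.any (fun c => ("pqrsoi".toList).contains c) = true) :
    ((l.filter (fun x => (['N','C','A','K','E'] : List Char).contains x
        || (['p','q','r','s','o','i'] : List Char).contains x)).length == 0) = false := by
  simp only [List.any_eq_true] at h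
  obtain ⟨c, hc, hm⟩ := h
  simp only [beq_eq_false_iff_ne, ne_eq, List.length_eq_zero_iff, List.filter_eq_nil_iff]
  intro hall
  have := hall c hc
  simp at this hm
  tauto

-- A's single-character guard is dead once a propositional variable occurs
theorem guard7_dead (s : String)
    (h : s.toList.any (fun c => ("pqrsoi".toList).contains c) = true) :
    (s.toList.length == 1 && !((["p","q","r","s","o","i"] : List String).contains s)) = false := by
  cases hlen : (s.toList.length == 1) with
  | false => simp [hlen]
  | true =>
    simp only [beq_iff_eq, List.length_eq_one_iff] at hlen
    obtain ⟨c, hc⟩ := hlen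
    rw [hc] at h
    simp only [List.any_cons, List.any_nil, Bool.or_false] at h
    have hs : s = String.ofList [c] := by
      have := congrArg String.ofList hc
      simpa using this
    simp at h
    rcases h with rfl | rfl | rfl | rfl | rfl | rfl <;> subst hs <;> decide

-- swap of a bounded ∀ over a two/one-element membership, used to discharge the banned-letter guard
theorem forall_two (l : List Char) (a b : Char) :
    (∀ x ∈ l, ¬x = a ∧ ¬x = b) ↔ a ∉ l ∧ b ∉ l := by
  constructor
  · intro h
    exact ⟨fun ha => (h a ha).1 rfl, fun hb => (h b hb).2 rfl⟩
  · rintro ⟨ha, hb⟩ x hx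
    exact ⟨fun e => ha (e ▸ hx), fun e => hb (e ▸ hx)⟩

theorem forall_one (l : List Char) (a : Char) :
    (∀ x ∈ l, ¬x = a) ↔ a ∉ l := by
  constructor
  · intro h ha; exact h a ha rfl
  · intro ha x hx e; exact ha (e ▸ hx)

-- ===== VERDICT (by name: the statement is the Claim_ definition above) =====
theorem wff_eval_spec : Claim_equal_wff_eval := by
  intro s mode _
  unfold Spec_wff_eval
  simp only [wff_eval, wff_eval_alt]
  by_cases hlow : s.toList.any (fun c => ("pqrsoi".toList).contains c) = true
  · -- some propositional variable occurs: A's guards 1, 2, 7 do not fire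
    rw [guard1_eq, hlow, guard2_dead _ hlow, guard7_dead _ hlow]
    by_cases hlen : 6 < s.length
    · simp [hlen]
    · by_cases hm0 : mode = 0
      · subst hm0
        by_cases ho : 'o' ∈ s.toList <;> by_cases hi : 'i' ∈ s.toList <;>
          simp [hlen, ho, hi, forall_two, loopA_eq, ← phase2_eq]
      · by_cases hm1 : mode = 1
        · subst hm1
          by_cases hi : 'i' ∈ s.toList <;>
            simp [hlen, hi, forall_one, loopA_eq, ← phase2_eq]
        · by_cases hm2 : mode = 2
          · subst hm2
            by_cases ho : 'o' ∈ s.toList <;>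
              simp [hlen, ho, forall_one, loopA_eq, ← phase2_eq]
          · simp [hlen, hm0, hm1, hm2, loopA_eq, ← phase2_eq]
  · -- no propositional variable: both sides are false
    rw [guard1_eq]
    simp only [Bool.not_eq_true] at hlow
    simp at hlow
    simp
    rw [decide_eq_true hlow]
    simp
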